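-- pv_equiv track=rewrite | github.com/ethanolivertroy/compliance-pipeline | compliance_pipeline/c2p_plugin/opa.py | _group_results_by_policy
-- ===== SOURCE A (Python) =====
-- from typing import Any, Dict, List, Optional
--
-- def _group_results_by_policy(results: List[Dict]) -> Dict[str, List]:
--     """Group pre-normalized results by policy name."""
--     grouped = {}
--     for result in results:
--         policy_name = result.get('policy', result.get('rule', 'unknown'))
--         if policy_name not in grouped:
--             grouped[policy_name] = []
--         grouped[policy_name].append(result)
--     return grouped
-- ===== SOURCE B (Python) =====
-- from typing import Any, Dict, List, Optional
--
-- def _group_results_by_policy(results: List[Dict]) -> Dict[str, List]: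
--     """Group pre-normalized results by policy name (distinct-keys pass, then one filter per key)."""
--     def key(r):
--         return r.get('policy', r.get('rule', 'unknown'))
--     ordered_keys = list(dict.fromkeys(key(r) for r in results))
--     return {k: [r for r in results if key(r) == k] for k in ordered_keys}
-- ===== Notes on version B (the rewrite author's own statement) =====
-- stated objective: alternative
-- what changed: B first collects the distinct policy keys in order of first appearance (dict.fromkeys) and then builds each group with one filtering pass per key, instead of A's single-pass hash accumulation into a dict of lists.
import Mathlib
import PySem

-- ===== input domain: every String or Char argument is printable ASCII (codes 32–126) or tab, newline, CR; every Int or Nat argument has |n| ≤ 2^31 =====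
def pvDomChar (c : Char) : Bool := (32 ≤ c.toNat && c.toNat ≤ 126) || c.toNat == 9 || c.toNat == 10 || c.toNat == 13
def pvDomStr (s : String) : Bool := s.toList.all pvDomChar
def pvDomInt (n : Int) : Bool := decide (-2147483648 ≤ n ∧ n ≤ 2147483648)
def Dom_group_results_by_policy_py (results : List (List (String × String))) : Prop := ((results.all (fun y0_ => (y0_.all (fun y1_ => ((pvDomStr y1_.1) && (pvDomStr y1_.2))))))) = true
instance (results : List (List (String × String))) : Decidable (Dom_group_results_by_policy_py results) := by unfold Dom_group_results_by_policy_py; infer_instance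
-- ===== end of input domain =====

-- B groups by a distinct-keys pass plus one filter per key instead of A's single-pass dict accumulation (alternative decomposition, same results).

-- shared helper: the Python key expression result.get('policy', result.get('rule', 'unknown')),
-- identical in both sources (r is a dict parameter, modeled as an association list)
def pvKey (r : List (String × String)) : String :=
  (PySem.Dict.mk r).getD "policy" ((PySem.Dict.mk r).getD "rule" "unknown")

-- ===== PORT A =====
-- grouped = {}; for result in results: k = key(result); if k not in grouped: grouped[k] = []; grouped[k].append(result); return grouped
def group_results_by_policy_py (results : List (List (String × String))) : List (String × List (List (String × String))) :=
  (results.foldl (fun grouped result =>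
      let k := pvKey result
      let grouped := if grouped.contains k then grouped else grouped.insert k []
      -- grouped[k].append(result): k is present here, so the default [] is never consulted
      grouped.modify k [] (fun v => v ++ [result]))
    PySem.Dict.empty).items

-- ===== PORT B =====
def group_results_by_policy_py_alt (results : List (List (String × String))) : List (String × List (List (String × String))) :=
  (PySem.List.dedup (results.map pvKey)).map
    (fun k => (k, results.filter (fun r => pvKey r == k)))

-- ===== PRECONDITION & SPEC =====
def Spec_group_results_by_policy_py (results : List (List (String × String))) (out : List (String × List (List (String × String)))) : Prop := out = group_results_by_policy_py_alt results
instance (results : List (List (String × String))) (out : List (String × List (List (String × String)))) : Decidable (Spec_group_results_by_policy_py results out) := by unfold Spec_group_results_by_policy_py; infer_instance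

-- ===== CLAIM (what is proved, stated in full; the proofs are below) =====
def Claim_equal_group_results_by_policy_py : Prop := ∀ (results : List (List (String × String))), Dom_group_results_by_policy_py results → Spec_group_results_by_policy_py results (group_results_by_policy_py results)

-- ===== LEMMAS AND PROOFS =====

-- A's loop body ('insert [] if absent, then append') is extensionally the single modify step
theorem pv_step_eq :
    (fun (grouped : PySem.Dict String (List (List (String × String)))) result =>
      let k := pvKey result
      let grouped := if grouped.contains k then grouped else grouped.insert k []
      grouped.modify k [] (fun v => v ++ [result]))
    = (fun grouped result => grouped.modify (pvKey result) [] (fun v => v ++ [result])) := by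
  funext g r
  by_cases h : g.contains (pvKey r)
  · simp [h]
  · have hc : g.contains (pvKey r) = false := by simpa using h
    simp [h, PySem.Dict.modify, PySem.Dict.getD_insert_self,
      PySem.Dict.insert_insert_self, PySem.Dict.getD_of_not_contains g _ hc]

theorem group_results_by_policy_py_spec : Claim_equal_group_results_by_policy_py := by
  intro results _
  unfold Spec_group_results_by_policy_py group_results_by_policy_py group_results_by_policy_py_alt
  rw [pv_step_eq]
  set F : PySem.Dict String (List (List (String × String))) :=
    results.foldl (fun grouped result => grouped.modify (pvKey result) [] (fun v => v ++ [result]))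
      PySem.Dict.empty with hF
  have hkeys : F.keys = PySem.List.dedup (results.map pvKey) := by
    rw [hF, PySem.Dict.keys_foldl_modify_key results pvKey [] (fun _ r v => v ++ [r])]
    simp [PySem.List.dedup_eq_ofList, PySem.Set.update_nil_left, PySem.Dict.keys_empty]
  have hnodup : F.keys.Nodup := by
    rw [hF]
    exact PySem.Dict.nodup_keys_foldl_modify_key results pvKey [] (fun _ r v => v ++ [r]) _
      (by simp [PySem.Dict.keys_empty])
  have hgetD : ∀ k, F.getD k [] = results.filter (fun r => pvKey r == k) := by
    intro k
    have hmap : F = (results.map (fun r => (pvKey r, r))).foldl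
        (fun d p => d.modify p.1 [] (fun v => v ++ [p.2])) PySem.Dict.empty := by
      rw [hF, List.foldl_map]
    rw [hmap, PySem.Dict.getD_foldl_modify_append]
    simp [List.filter_map, Function.comp_def]
  rw [PySem.Dict.items_eq_map_keys F hnodup [], hkeys]
  exact List.map_congr_left (fun k _ => by rw [hgetD k])

-- ===== VERDICT (by name: the statement is the Claim_ definition above) =====
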